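-- pv_equiv track=rewrite | github.com/imfeng/Plutus | cubitcrack.py | passImpossible
-- ===== SOURCE A (Python) =====
-- def passImpossible(hexstr):
--     temp = None
--     cnt = 0
--     zerocnt = 0
--     for st in hexstr[:-6]:
--         if st == temp:
--             cnt += 1
--         if st == '0':
--             zerocnt += 1
--         temp = st
--     return cnt > 6 or zerocnt > 6
-- ===== SOURCE B (Python) =====
-- def passImpossible(hexstr):
--     s = hexstr[:-6]
--     runs = []
--     i = 0
--     while i < len(s):
--         j = i + 1
--         while j < len(s) and s[j] == s[i]:
--             j += 1
--         runs.append((s[i], j - i))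
--         i = j
--     cnt = len(s) - len(runs)
--     zerocnt = sum(n for c, n in runs if c == '0')
--     return cnt > 6 or zerocnt > 6
-- ===== Notes on version B (the rewrite author's own statement) =====
-- stated objective: alternative
-- what changed: Replaces A's single fused character scan carrying a previous-character sentinel with a run-length encoding built by an index-jumping two-level loop; the repeat count becomes len(s) - number_of_runs and the zero count the summed lengths of '0' runs.
import Mathlib
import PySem

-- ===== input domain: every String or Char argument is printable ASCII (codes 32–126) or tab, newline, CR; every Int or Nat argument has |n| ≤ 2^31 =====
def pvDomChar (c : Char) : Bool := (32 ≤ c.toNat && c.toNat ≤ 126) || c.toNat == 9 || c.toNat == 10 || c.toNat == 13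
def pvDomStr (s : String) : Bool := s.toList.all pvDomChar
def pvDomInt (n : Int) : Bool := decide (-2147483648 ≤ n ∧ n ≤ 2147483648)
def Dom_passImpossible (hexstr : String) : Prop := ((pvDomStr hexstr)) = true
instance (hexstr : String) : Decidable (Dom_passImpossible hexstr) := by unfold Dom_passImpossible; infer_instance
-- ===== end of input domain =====

-- B replaces A's single fused sentinel-carrying scan with a run-length encoding
-- (index-jumping two-level loop); cnt = len - #runs, zerocnt = summed '0' runs. Objective: alternative.

-- ===== PORT A =====
-- one loop step: temp-comparison, zero-count, update temp
def pvStepA (acc : Option Char × Nat × Nat) (st : Char) : Option Char × Nat × Nat :=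
  let cnt := if (match acc.1 with | none => false | some t => st == t) then acc.2.1 + 1 else acc.2.1
  let zerocnt := if st == '0' then acc.2.2 + 1 else acc.2.2
  (some st, cnt, zerocnt)

def passImpossible (hexstr : String) : Bool :=
  let s := PySem.List.slice hexstr.toList none (some (-6))
  let r := s.foldl pvStepA (none, 0, 0)
  decide (r.2.1 > 6) || decide (r.2.2 > 6)

-- ===== PORT B =====
-- inner while loop of Source B: how many leading characters of t equal c (j advances past them)
def pvRunLen (c : Char) : List Char → Nat
  | [] => 0
  | d :: t => if d == c then 1 + pvRunLen c t else 0

-- outer while loop of Source B: the run-length encoding (s[i], j - i) pairs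
def pvRLE : List Char → List (Char × Nat)
  | [] => []
  | c :: t => (c, pvRunLen c t + 1) :: pvRLE (t.drop (pvRunLen c t))
termination_by s => s.length
decreasing_by
  simp only [List.length_cons, List.length_drop]
  omega

def passImpossible_alt (hexstr : String) : Bool :=
  let s := PySem.List.slice hexstr.toList none (some (-6))
  let runs := pvRLE s
  let cnt := s.length - runs.length
  let zerocnt := ((runs.filter (fun r => r.1 == '0')).map Prod.snd).sum
  decide (cnt > 6) || decide (zerocnt > 6)

-- ===== PRECONDITION & SPEC =====
def Spec_passImpossible (hexstr : String) (out : Bool) : Prop := out = passImpossible_alt hexstr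
instance (hexstr : String) (out : Bool) : Decidable (Spec_passImpossible hexstr out) := by unfold Spec_passImpossible; infer_instance

-- ===== CLAIM (what is proved, stated in full; the proofs are below) =====
def Claim_equal_passImpossible : Prop := ∀ (hexstr : String), Dom_passImpossible hexstr → Spec_passImpossible hexstr (passImpossible hexstr)

-- ===== LEMMAS AND PROOFS =====

theorem pvRunLen_le (c : Char) : ∀ t : List Char, pvRunLen c t ≤ t.length
  | [] => Nat.le_refl 0
  | d :: t => by
    simp only [pvRunLen, List.length_cons]
    split
    · have := pvRunLen_le c t; omega
    · omega


-- number of adjacent equal pairs of s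
def pvPairs (s : List Char) : Nat := (s.zip s.tail).countP (fun p => p.1 == p.2)

-- A's fold started with a known previous character c counts adjacent equal pairs of c::l and zeros of l
theorem pvFoldA_some (l : List Char) : ∀ (c : Char) (cnt z : Nat),
    l.foldl pvStepA (some c, cnt, z) =
      (some (l.getLastD c),
       cnt + ((c :: l).zip l).countP (fun p => p.1 == p.2),
       z + l.count '0') := by
  induction l with
  | nil => intro c cnt z; simp [List.foldl]
  | cons d l ih =>
    intro c cnt z
    simp only [List.foldl_cons, pvStepA, ih, List.getLastD_cons, List.zip_cons_cons,
      List.countP_cons, List.count_cons, Prod.mk.injEq]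
    have hcomm : (d == c) = (c == d) := by
      by_cases h : c = d
      · simp [h]
      · have h' : ¬ d = c := fun hh => h hh.symm
        simp [h, h']
    rw [hcomm]
    refine ⟨trivial, ?_, ?_⟩ <;> split_ifs <;> ring

-- skipping the first run of c: pairs of c::t = run length + pairs of the remainder
theorem pvPairs_run : ∀ (t : List Char) (c : Char),
    pvPairs (c :: t) = pvRunLen c t + pvPairs (t.drop (pvRunLen c t)) := by
  intro t
  induction t with
  | nil => intro c; simp [pvPairs, pvRunLen]
  | cons d t' ih =>
    intro c
    by_cases h : d = c
    · subst h
      simp only [pvRunLen, beq_self_eq_true, if_true]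
      rw [Nat.add_comm 1 (pvRunLen d t'), List.drop_succ_cons]
      have hstep : pvPairs (d :: d :: t') = 1 + pvPairs (d :: t') := by
        simp [pvPairs]
        omega
      rw [hstep, ih d]
      omega
    · have hb : (d == c) = false := by simp [h]
      have h' : ¬ c = d := fun hh => h hh.symm
      simp only [pvRunLen, hb, Bool.false_eq_true, if_false, List.drop_zero]
      have hstep : pvPairs (c :: d :: t') = pvPairs (d :: t') := by
        simp [pvPairs, h']
      omega

-- skipping the first run of c: zeros of t = (run length if c='0') + zeros of the remainder
theorem pvCount_run : ∀ (t : List Char) (c : Char),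
    t.count '0' = (if c == '0' then pvRunLen c t else 0) + (t.drop (pvRunLen c t)).count '0' := by
  intro t
  induction t with
  | nil => intro c; simp [pvRunLen]
  | cons d t' ih =>
    intro c
    by_cases h : d = c
    · subst h
      simp only [pvRunLen, beq_self_eq_true, if_true]
      rw [Nat.add_comm 1 (pvRunLen d t'), List.drop_succ_cons, List.count_cons, ih d]
      split_ifs <;> simp_all <;> omega
    · have hb : (d == c) = false := by simp [h]
      simp only [pvRunLen, hb, Bool.false_eq_true, if_false, List.drop_zero]
      split <;> omega

-- pairs + number of runs = length
theorem pvPairs_add_rle (s : List Char) : pvPairs s + (pvRLE s).length = s.length := by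
  induction s using pvRLE.induct with
  | case1 => simp [pvPairs, pvRLE]
  | case2 c t ih =>
    rw [pvRLE]
    simp only [List.length_cons]
    have h1 := pvPairs_run t c
    have h2 := pvRunLen_le c t
    have h3 : (t.drop (pvRunLen c t)).length = t.length - pvRunLen c t := by
      simp [List.length_drop]
    omega

-- summed '0'-run lengths = count of '0'
theorem pvZeroRuns (s : List Char) :
    (((pvRLE s).filter (fun r => r.1 == '0')).map Prod.snd).sum = s.count '0' := by
  induction s using pvRLE.induct with
  | case1 => simp [pvRLE]
  | case2 c t ih =>
    rw [pvRLE]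
    have h := pvCount_run t c
    rw [List.count_cons]
    by_cases hz : c = '0'
    · subst hz
      simp only [List.filter_cons, beq_self_eq_true, if_true, List.map_cons, List.sum_cons, ih]
      simp only [beq_self_eq_true, if_true] at h
      omega
    · have hb : (c == '0') = false := by simp [hz]
      simp only [List.filter_cons, hb, Bool.false_eq_true, if_false, ih]
      simp only [hb, Bool.false_eq_true, if_false] at h
      omega

theorem passImpossible_eq_alt (hexstr : String) :
    passImpossible hexstr = passImpossible_alt hexstr := by
  unfold passImpossible passImpossible_alt
  cases hs : PySem.List.slice hexstr.toList none (some (-6)) with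
  | nil => simp [List.foldl, pvRLE]
  | cons c l =>
    simp only [List.foldl_cons, pvStepA, pvFoldA_some]
    have h1 : (if false = true then 0 + 1 else 0) = 0 := rfl
    have hpairs : ((c :: l).zip l).countP (fun p => p.1 == p.2) = pvPairs (c :: l) := by
      simp [pvPairs]
    have hlen := pvPairs_add_rle (c :: l)
    have hzero := pvZeroRuns (c :: l)
    congr 1
    · rw [decide_eq_decide, h1, Nat.zero_add, hpairs]
      omega
    · rw [decide_eq_decide, hzero, List.count_cons]
      split <;> omega

-- ===== VERDICT (by name: the statement is the Claim_ definition above) =====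
theorem passImpossible_spec : Claim_equal_passImpossible := by
  intro hexstr _
  exact passImpossible_eq_alt hexstr
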